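-- pv_equiv track=rewrite | github.com/MikeVances/MYXON | tools/remote_plus_proto/screen_decode.py | decode_sirius
-- ===== SOURCE A (Python) =====
-- BLACK = 0
--
-- WHITE = 255
--
-- def decode_sirius(screen_hex: str) -> tuple[int, int, list[int]]:
--     width = 122
--     height = 32
--     total = width * height
--     pixels = [WHITE] * total
--     e = 0
--     s = 0
--     # Matches app logic: iterate bytes and write 8 bits each
--     for f in range(0, total // 4, 2):
--         if f + 2 > len(screen_hex):
--             break
--         l = int(screen_hex[f : f + 2], 16)
--         for c in range(8):
--             pos = e + s * width
--             if pos >= total: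
--                 return width, height, pixels
--             bit = 1 if ((l >> c) & 1) else 0
--             pixels[pos] = BLACK if bit else WHITE
--             s += 1
--             if s >= height:
--                 s = 0
--                 e += 1
--     return width, height, pixels
-- ===== SOURCE B (Python) =====
-- BLACK = 0
--
-- WHITE = 255
--
-- def decode_sirius(screen_hex: str) -> tuple[int, int, list[int]]:
--     width = 122
--     height = 32
--     total = width * height
--     # Pass 1: decode up to total//8 bytes into a flat LSB-first bit list.
--     bits = []
--     for byte_idx in range(0, total // 8):
--         chunk = screen_hex[2 * byte_idx : 2 * byte_idx + 2]
--         if len(chunk) < 2: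
--             break
--         l = int(chunk, 16)
--         for c in range(8):
--             bits.append((l >> c) & 1)
--     # Pass 2: scatter the bits column-major by closed-form index.
--     pixels = [WHITE] * total
--     for k, bit in enumerate(bits):
--         pixels[(k % height) * width + k // height] = BLACK if bit else WHITE
--     return width, height, pixels
-- ===== Notes on version B (the rewrite author's own statement) =====
-- stated objective: alternative
-- what changed: A's single loop with s/e row-column counters (reset-and-carry state machine writing pixels while decoding) is replaced by two separate passes: first decode the capped hex chunks into a flat LSB-first bit list, then scatter bit k to the closed-form column-major index (k % height) * width + k // height.
import Mathlib
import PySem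

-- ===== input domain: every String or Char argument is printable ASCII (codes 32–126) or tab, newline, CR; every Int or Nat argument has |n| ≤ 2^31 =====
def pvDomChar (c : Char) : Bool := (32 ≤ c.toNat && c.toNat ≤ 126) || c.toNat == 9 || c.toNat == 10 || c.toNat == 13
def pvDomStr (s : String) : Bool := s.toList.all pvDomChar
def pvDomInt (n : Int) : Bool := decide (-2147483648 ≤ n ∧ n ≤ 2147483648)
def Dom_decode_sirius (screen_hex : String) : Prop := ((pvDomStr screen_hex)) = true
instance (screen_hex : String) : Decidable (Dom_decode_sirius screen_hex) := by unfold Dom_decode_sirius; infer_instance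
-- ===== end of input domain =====

-- B decodes the hex bytes into a flat LSB-first bit list and then scatters it with the
-- closed-form column-major index (k % 32) * 122 + k / 32, replacing A's s/e counter state
-- machine; objective: alternative (same cost, different decomposition).

-- ===== PORT A =====
-- A-side helpers: A's two loop bodies, named so the proofs can refer to them.
-- Python's `break` and the early `return` both end in `return width, height, pixels`,
-- so both are modelled by a frozen `done = true` state that later iterations pass through.
def pvBitBody (l : Int) (st2 : List Int × Int × Int × Bool) (c : Int) : List Int × Int × Int × Bool :=
  match st2 with
  | (pixels, e, s, true) => (pixels, e, s, true)
  | (pixels, e, s, false) =>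
    let pos := e + s * 122
    if pos ≥ 3904 then (pixels, e, s, true)
    else
      let bit : Int := if PySem.Int.band (l >>> (c.toNat : Int)) 1 ≠ 0 then 1 else 0
      let pixels' := PySem.List.pySetD pixels pos (if bit ≠ 0 then 0 else 255)
      let s' := s + 1
      if s' ≥ 32 then (pixels', e + 1, 0, false) else (pixels', e, s', false)

def pvByteBody (chars : List Char) (st : List Int × Int × Int × Bool) (f : Int) : List Int × Int × Int × Bool :=
  match st with
  | (pixels, e, s, true) => (pixels, e, s, true)
  | (pixels, e, s, false) =>
    if f + 2 > PySem.List.len chars then (pixels, e, s, true)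
    else
      let l := (PySem.Int.ofCharsBase? (PySem.List.slice chars (some f) (some (f + 2))) 16).getD 0
      (PySem.List.pyRange 0 8 1).foldl (pvBitBody l) (pixels, e, s, false)

def decode_sirius (screen_hex : String) : Int × Int × List Int :=
  let width : Int := 122
  let height : Int := 32
  let total : Int := width * height
  let chars := screen_hex.toList
  let st := (PySem.List.pyRange 0 (PySem.Int.floordiv total 4) 2).foldl (pvByteBody chars)
      ((List.replicate total.toNat 255 : List Int), (0 : Int), (0 : Int), false)
  (width, height, st.1)

-- ===== PORT B =====
-- B-side helpers: B's loop bodies.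
def pvChunkBody (chars : List Char) (st : List Int × Bool) (byte_idx : Int) : List Int × Bool :=
  match st with
  | (bits, true) => (bits, true)
  | (bits, false) =>
    let chunk := PySem.List.slice chars (some (2 * byte_idx)) (some (2 * byte_idx + 2))
    if PySem.List.len chunk < 2 then (bits, true)
    else
      let l := (PySem.Int.ofCharsBase? chunk 16).getD 0
      ((PySem.List.pyRange 0 8 1).foldl (fun bits c => bits ++ [PySem.Int.band (l >>> c.toNat) 1]) bits, false)

def pvPixBody (pixels : List Int) (kb : Int × Int) : List Int :=
  PySem.List.pySetD pixels (PySem.Int.mod kb.1 32 * 122 + PySem.Int.floordiv kb.1 32)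
    (if kb.2 ≠ 0 then 0 else 255)

def decode_sirius_alt (screen_hex : String) : Int × Int × List Int :=
  let width : Int := 122
  let height : Int := 32
  let total : Int := width * height
  let chars := screen_hex.toList
  let bitsSt := (PySem.List.pyRange 0 (PySem.Int.floordiv total 8) 1).foldl (pvChunkBody chars)
      (([] : List Int), false)
  let pixels := (PySem.List.enumerate bitsSt.1 0).foldl pvPixBody (List.replicate total.toNat 255)
  (width, height, pixels)

-- ===== PRECONDITION & SPEC =====
-- Pre_ excludes exactly the inputs on which Python A raises ValueError: some consumed
-- 2-character chunk of the hex string is not a valid base-16 int literal.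
def Pre_decode_sirius (screen_hex : String) : Prop :=
  ∀ j, j < min 488 (screen_hex.toList.length / 2) →
    PySem.Int.ofCharsBase? ((screen_hex.toList.drop (2 * j)).take 2) 16 ≠ none
instance (screen_hex : String) : Decidable (Pre_decode_sirius screen_hex) := by
  unfold Pre_decode_sirius; infer_instance

def pvWitness_decode_sirius : String := "ff00A1"

def Spec_decode_sirius (screen_hex : String) (out : Int × Int × List Int) : Prop := out = decode_sirius_alt screen_hex
instance (screen_hex : String) (out : Int × Int × List Int) : Decidable (Spec_decode_sirius screen_hex out) := by unfold Spec_decode_sirius; infer_instance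

-- ===== CLAIM (what is proved, stated in full; the proofs are below) =====
def Claim_equal_decode_sirius : Prop := ∀ (screen_hex : String), Dom_decode_sirius screen_hex → Pre_decode_sirius screen_hex → Spec_decode_sirius screen_hex (decode_sirius screen_hex)

-- ===== LEMMAS AND PROOFS =====

def pvNB (chars : List Char) : Nat := min 488 (chars.length / 2)

def pvParse (chars : List Char) (j : Nat) : Int :=
  (PySem.Int.ofCharsBase? ((chars.drop (2 * j)).take 2) 16).getD 0

def pvBitsOf (l : Int) : List Int :=
  [PySem.Int.band (l >>> ((0 : Nat) : Int)) 1, PySem.Int.band (l >>> ((1 : Nat) : Int)) 1,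
   PySem.Int.band (l >>> ((2 : Nat) : Int)) 1, PySem.Int.band (l >>> ((3 : Nat) : Int)) 1,
   PySem.Int.band (l >>> ((4 : Nat) : Int)) 1, PySem.Int.band (l >>> ((5 : Nat) : Int)) 1,
   PySem.Int.band (l >>> ((6 : Nat) : Int)) 1, PySem.Int.band (l >>> ((7 : Nat) : Int)) 1]

def pvScatter : List Int → Nat → List Int → List Int
  | [], _, px => px
  | b :: bs, k, px =>
      pvScatter bs (k + 1)
        (PySem.List.pySetD px ((↑(k % 32) * 122 + ↑(k / 32) : Int)) (if b ≠ 0 then 0 else 255))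

def pvFlat (chars : List Char) (j0 : Nat) : List Int :=
  ((List.range' j0 (pvNB chars - j0)).map (pvParse chars)).flatMap pvBitsOf

lemma pvScatter_append (xs ys : List Int) (k : Nat) (px : List Int) :
    pvScatter (xs ++ ys) k px = pvScatter ys (k + xs.length) (pvScatter xs k px) := by
  induction xs generalizing k px with
  | nil => simp [pvScatter]
  | cons b bs ih => simp [pvScatter, ih, Nat.add_assoc, Nat.add_comm 1 bs.length]

lemma pvChunkSlice (chars : List Char) (j : Nat) :
    PySem.List.slice chars (some ((2 * j : Nat) : Int)) (some (((2 * j : Nat) : Int) + 2))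
      = (chars.drop (2 * j)).take 2 := by
  have h : (((2 * j : Nat) : Int) + 2) = (((2 * j + 2 : Nat) : Int)) := by push_cast; ring
  rw [h, PySem.List.slice_natCast]
  congr 1
  omega

lemma pvStep1 (l : Int) (px : List Int) (c : Int) (u : Nat) (hu : u < 3904) :
    pvBitBody l (px, (↑(u / 32) : Int), (↑(u % 32) : Int), false) c
      = (PySem.List.pySetD px ((↑(u % 32) * 122 + ↑(u / 32) : Int))
           (if PySem.Int.band (l >>> (c.toNat : Int)) 1 ≠ 0 then 0 else 255),
         (↑((u + 1) / 32) : Int), (↑((u + 1) % 32) : Int), false) := by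
  show (if (↑(u / 32) + ↑(u % 32) * 122 : Int) ≥ 3904 then ((px, (↑(u / 32) : Int), (↑(u % 32) : Int), true) : List Int × Int × Int × Bool)
    else
      let bit : Int := if PySem.Int.band (l >>> (c.toNat : Int)) 1 ≠ 0 then 1 else 0
      let pixels' := PySem.List.pySetD px (↑(u / 32) + ↑(u % 32) * 122) (if bit ≠ 0 then 0 else 255)
      let s' := (↑(u % 32) : Int) + 1
      if s' ≥ 32 then (pixels', ↑(u / 32) + 1, 0, false) else (pixels', ↑(u / 32), s', false)) = _
  rw [if_neg (by omega : ¬ ((↑(u / 32) + ↑(u % 32) * 122 : Int) ≥ 3904))]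
  have hv : (if (if PySem.Int.band (l >>> (c.toNat : Int)) 1 ≠ 0 then (1:Int) else 0) ≠ 0 then (0:Int) else 255)
      = (if PySem.Int.band (l >>> (c.toNat : Int)) 1 ≠ 0 then 0 else 255) := by
    by_cases hb : PySem.Int.band (l >>> (c.toNat : Int)) 1 ≠ 0 <;> simp [hb]
  have hp : (↑(u / 32) + ↑(u % 32) * 122 : Int) = (↑(u % 32) * 122 + ↑(u / 32) : Int) := by ring
  simp only [hv, hp]
  by_cases h31 : u % 32 = 31
  · rw [if_pos (by omega : ((↑(u % 32) : Int) + 1 ≥ 32))]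
    refine Prod.ext rfl (Prod.ext ?_ (Prod.ext ?_ rfl)) <;> simp <;> omega
  · rw [if_neg (by omega : ¬ ((↑(u % 32) : Int) + 1 ≥ 32))]
    refine Prod.ext rfl (Prod.ext ?_ (Prod.ext ?_ rfl)) <;> simp <;> omega

lemma pvInner8 (l : Int) (px : List Int) (u : Nat) (hu : u + 8 ≤ 3904) :
    (PySem.List.pyRange 0 8 1).foldl (pvBitBody l) (px, (↑(u / 32) : Int), (↑(u % 32) : Int), false)
      = (pvScatter (pvBitsOf l) u px, (↑((u + 8) / 32) : Int), (↑((u + 8) % 32) : Int), false) := by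
  have hr : PySem.List.pyRange 0 8 1 = [0, 1, 2, 3, 4, 5, 6, 7] := by decide
  rw [hr]
  simp only [List.foldl_cons, List.foldl_nil]
  rw [pvStep1 l _ 0 u (by omega), pvStep1 l _ 1 (u + 1) (by omega),
      pvStep1 l _ 2 (u + 1 + 1) (by omega), pvStep1 l _ 3 (u + 1 + 1 + 1) (by omega),
      pvStep1 l _ 4 (u + 1 + 1 + 1 + 1) (by omega), pvStep1 l _ 5 (u + 1 + 1 + 1 + 1 + 1) (by omega),
      pvStep1 l _ 6 (u + 1 + 1 + 1 + 1 + 1 + 1) (by omega),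
      pvStep1 l _ 7 (u + 1 + 1 + 1 + 1 + 1 + 1 + 1) (by omega)]
  simp only [pvScatter, pvBitsOf,
    show ((0:Int)).toNat = 0 from rfl, show ((1:Int)).toNat = 1 from rfl,
    show ((2:Int)).toNat = 2 from rfl, show ((3:Int)).toNat = 3 from rfl,
    show ((4:Int)).toNat = 4 from rfl, show ((5:Int)).toNat = 5 from rfl,
    show ((6:Int)).toNat = 6 from rfl, show ((7:Int)).toNat = 7 from rfl,
    show u+1+1+1+1+1+1+1+1 = u+8 from by omega]

lemma pvFrozenA (chars : List Char) (fs : List Int) (px : List Int) (e s : Int) :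
    fs.foldl (pvByteBody chars) (px, e, s, true) = (px, e, s, true) := by
  induction fs with
  | nil => rfl
  | cons f fs ih => simpa [pvByteBody] using ih

lemma pvOuterA (chars : List Char) (n : Nat) : ∀ (j0 : Nat) (px : List Int),
    pvNB chars ≤ j0 + n → j0 ≤ pvNB chars → j0 + n ≤ 488 →
    ∃ e s d,
      ((List.range' j0 n).map fun j => ((2 * j : Nat) : Int)).foldl (pvByteBody chars)
          (px, (↑((8 * j0) / 32) : Int), (↑((8 * j0) % 32) : Int), false)
        = (pvScatter (pvFlat chars j0) (8 * j0) px, e, s, d) := by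
  induction n with
  | zero =>
    intro j0 px h1 h2 h3
    have hj : j0 = pvNB chars := by omega
    refine ⟨↑((8 * j0) / 32), ↑((8 * j0) % 32), false, ?_⟩
    simp [pvFlat, hj, pvScatter]
  | succ n ih =>
    intro j0 px h1 h2 h3
    rw [List.range'_succ, List.map_cons, List.foldl_cons]
    by_cases hlt : j0 < pvNB chars
    · -- byte j0 is processed
      have hnb2 : pvNB chars ≤ chars.length / 2 := by simp [pvNB]
      have hnotbrk : ¬ (((2 * j0 : Nat) : Int) + 2 > PySem.List.len chars) := by
        simp only [PySem.List.len_eq]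
        omega
      have hbody : pvByteBody chars (px, (↑((8 * j0) / 32) : Int), (↑((8 * j0) % 32) : Int), false) ((2 * j0 : Nat) : Int)
          = (pvScatter (pvBitsOf (pvParse chars j0)) (8 * j0) px,
             (↑((8 * (j0 + 1)) / 32) : Int), (↑((8 * (j0 + 1)) % 32) : Int), false) := by
        simp only [pvByteBody, if_neg hnotbrk, pvChunkSlice]
        rw [pvInner8 _ _ (8 * j0) (by omega)]
        have h8 : 8 * j0 + 8 = 8 * (j0 + 1) := by omega
        rw [h8]
        rfl
      rw [hbody]
      obtain ⟨e, s, d, hres⟩ := ih (j0 + 1) (pvScatter (pvBitsOf (pvParse chars j0)) (8 * j0) px)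
        (by omega) (by omega) (by omega)
      refine ⟨e, s, d, ?_⟩
      rw [hres]
      congr 1
      have hsplit : pvFlat chars j0 = pvBitsOf (pvParse chars j0) ++ pvFlat chars (j0 + 1) := by
        unfold pvFlat
        have : pvNB chars - j0 = (pvNB chars - (j0 + 1)) + 1 := by omega
        rw [this, List.range'_succ, List.map_cons, List.flatMap_cons]
      rw [hsplit, pvScatter_append]
      have hlen : (pvBitsOf (pvParse chars j0)).length = 8 := by simp [pvBitsOf]
      rw [hlen, show 8 * j0 + 8 = 8 * (j0 + 1) from by omega]
    · -- break at j0 = pvNB chars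
      have hj : j0 = pvNB chars := by omega
      have hbrk : (((2 * j0 : Nat) : Int) + 2 > PySem.List.len chars) := by
        simp only [PySem.List.len_eq]
        unfold pvNB at hj
        omega
      have hbody : pvByteBody chars (px, (↑((8 * j0) / 32) : Int), (↑((8 * j0) % 32) : Int), false) ((2 * j0 : Nat) : Int)
          = (px, (↑((8 * j0) / 32) : Int), (↑((8 * j0) % 32) : Int), true) := by
        simp only [pvByteBody, if_pos hbrk]
      rw [hbody, pvFrozenA]
      refine ⟨↑((8 * j0) / 32), ↑((8 * j0) % 32), true, ?_⟩
      simp [pvFlat, hj, pvScatter]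

lemma pvA_eq (screen_hex : String) :
    decode_sirius screen_hex
      = (122, 32, pvScatter (pvFlat screen_hex.toList 0) 0 (List.replicate 3904 255)) := by
  simp only [decode_sirius]
  rw [show PySem.List.pyRange 0 (PySem.Int.floordiv ((122 : Int) * 32) 4) 2
      = (List.range' 0 488).map (fun j => ((2 * j : Nat) : Int)) from by set_option maxRecDepth 4096 in decide]
  obtain ⟨e, s, d, h⟩ := pvOuterA screen_hex.toList 488 0 (List.replicate 3904 255)
    (by unfold pvNB; omega) (by omega) (by omega)
  norm_num [show ((3904 : Int)).toNat = 3904 from rfl] at h ⊢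
  rw [h]

lemma pvFrozenB (chars : List Char) (fs : List Int) (bits : List Int) :
    fs.foldl (pvChunkBody chars) (bits, true) = (bits, true) := by
  induction fs with
  | nil => rfl
  | cons f fs ih => simpa [pvChunkBody] using ih

lemma pvBitsAppend (l : Int) (bits : List Int) :
    (PySem.List.pyRange 0 8 1).foldl (fun bits c => bits ++ [PySem.Int.band (l >>> c.toNat) 1]) bits
      = bits ++ pvBitsOf l := by
  rw [show PySem.List.pyRange 0 8 1 = [0, 1, 2, 3, 4, 5, 6, 7] from by decide]
  simp only [List.foldl_cons, List.foldl_nil, List.append_assoc, List.cons_append, List.nil_append]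
  rfl

lemma pvOuterB (chars : List Char) (n : Nat) : ∀ (j0 : Nat) (acc : List Int),
    pvNB chars ≤ j0 + n → j0 ≤ pvNB chars → j0 + n ≤ 488 →
    ∃ d,
      ((List.range' j0 n).map fun j => ((j : Nat) : Int)).foldl (pvChunkBody chars) (acc, false)
        = (acc ++ pvFlat chars j0, d) := by
  induction n with
  | zero =>
    intro j0 acc h1 h2 h3
    have hj : j0 = pvNB chars := by omega
    refine ⟨false, ?_⟩
    simp [pvFlat, hj]
  | succ n ih =>
    intro j0 acc h1 h2 h3
    rw [List.range'_succ, List.map_cons, List.foldl_cons]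
    have hcast : (2 * ((j0 : Nat) : Int)) = ((2 * j0 : Nat) : Int) := by push_cast; ring
    by_cases hlt : j0 < pvNB chars
    · have hnb2 : pvNB chars ≤ chars.length / 2 := by simp [pvNB]
      have hchunk : PySem.List.slice chars (some (2 * ((j0 : Nat) : Int))) (some (2 * ((j0 : Nat) : Int) + 2))
          = (chars.drop (2 * j0)).take 2 := by rw [hcast, pvChunkSlice]
      have hnotshort : ¬ (PySem.List.len ((chars.drop (2 * j0)).take 2) < 2) := by
        simp only [PySem.List.len_eq, List.length_take, List.length_drop]
        omega
      have hbody : pvChunkBody chars (acc, false) ((j0 : Nat) : Int)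
          = (acc ++ pvBitsOf (pvParse chars j0), false) := by
        simp only [pvChunkBody, hchunk, if_neg hnotshort, pvBitsAppend]
        rfl
      rw [hbody]
      obtain ⟨d, hres⟩ := ih (j0 + 1) (acc ++ pvBitsOf (pvParse chars j0)) (by omega) (by omega) (by omega)
      refine ⟨d, ?_⟩
      rw [hres]
      have hsplit : pvFlat chars j0 = pvBitsOf (pvParse chars j0) ++ pvFlat chars (j0 + 1) := by
        unfold pvFlat
        have : pvNB chars - j0 = (pvNB chars - (j0 + 1)) + 1 := by omega
        rw [this, List.range'_succ, List.map_cons, List.flatMap_cons]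
      rw [hsplit, List.append_assoc]
    · have hj : j0 = pvNB chars := by omega
      have hshort : (PySem.List.len (PySem.List.slice chars (some (2 * ((j0 : Nat) : Int))) (some (2 * ((j0 : Nat) : Int) + 2))) < 2) := by
        rw [hcast, pvChunkSlice]
        simp only [PySem.List.len_eq, List.length_take, List.length_drop]
        unfold pvNB at hj
        omega
      have hbody : pvChunkBody chars (acc, false) ((j0 : Nat) : Int) = (acc, true) := by
        simp only [pvChunkBody, if_pos hshort]
      rw [hbody, pvFrozenB]
      refine ⟨true, ?_⟩
      simp [pvFlat, hj]

lemma pvEnumScatter (bits : List Int) : ∀ (k : Nat) (px : List Int),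
    (PySem.List.enumerate bits (k : Int)).foldl pvPixBody px = pvScatter bits k px := by
  induction bits with
  | nil => intro k px; simp [PySem.List.enumerate_nil, pvScatter]
  | cons b bs ih =>
    intro k px
    rw [PySem.List.enumerate_cons, List.foldl_cons]
    have h1 : ((k : Int) + 1) = (((k + 1 : Nat)) : Int) := by push_cast; ring
    rw [h1, ih]
    simp only [pvScatter, pvPixBody, show ((32:Int)) = (((32:Nat)):Int) from rfl,
      PySem.Int.mod_natCast, PySem.Int.floordiv_natCast]

lemma pvB_eq (screen_hex : String) :
    decode_sirius_alt screen_hex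
      = (122, 32, pvScatter (pvFlat screen_hex.toList 0) 0 (List.replicate 3904 255)) := by
  simp only [decode_sirius_alt]
  rw [show PySem.List.pyRange 0 (PySem.Int.floordiv ((122 : Int) * 32) 8) 1
      = (List.range' 0 488).map (fun j => ((j : Nat) : Int)) from by set_option maxRecDepth 4096 in decide]
  obtain ⟨d, h⟩ := pvOuterB screen_hex.toList 488 0 []
    (by unfold pvNB; omega) (by omega) (by omega)
  rw [h]
  norm_num [show ((3904 : Int)).toNat = 3904 from rfl]
  rw [show ((0 : Int)) = ((0 : Nat) : Int) from rfl, pvEnumScatter]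

-- ===== VERDICT (by name: the statement is the Claim_ definition above) =====
theorem decode_sirius_spec : Claim_equal_decode_sirius := by
  intro screen_hex _ _
  unfold Spec_decode_sirius
  rw [pvA_eq, pvB_eq]
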